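-- pv_equiv track=rewrite | github.com/Clotonervo/wordle | main.py | optimizeList
-- ===== SOURCE A (Python) =====
-- def optimizeList(wordList):
--     # Each word gets a score based on other words in the dictionary
--     # Letters in same word get +1
--     # Letters in same position get +2 (greens are better than yellows)
--     # Then sort based on values/return highest value
--
--     valueList = []
--
--     if wordList == []:
--         return "No word found"
--
--     for word in wordList:
--         value = 0
--
--         for x in range(0, len(word)):
--             letter = word[x]
--             for i in range(0, len(wordList)):
--                 compareWord = wordList[i]
--                 if compareWord == word:
--                     continue
--                 elif letter in compareWord and letter == compareWord[x]:
--                     value += 2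
--                 elif letter in compareWord:
--                     value += 1
--
--         valueList.append(value)
--     max_value = max(valueList)
--     max_index = valueList.index(max_value)
--
--     return wordList[max_index]
-- ===== SOURCE B (Python) =====
-- def optimizeList(wordList):
--     # Faster exact re-implementation: precompute presence counts per letter and
--     # per-(position,letter) counts once, then score each word by table lookups.
--     if wordList == []:
--         return "No word found"
--
--     letters = []
--     for w in wordList:
--         for ch in w:
--             if ch not in letters:
--                 letters.append(ch)
--
--     presence = {l: sum(1 for w in wordList if l in w) for l in letters}
--     maxlen = max(len(w) for w in wordList)
--     pos = {(x, l): sum(1 for w in wordList if x < len(w) and w[x] == l)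
--            for x in range(maxlen) for l in letters}
--
--     best_word = None
--     best_val = None
--     for w in wordList:
--         c = wordList.count(w)
--         v = 0
--         for x in range(len(w)):
--             l = w[x]
--             v += presence[l] + pos[(x, l)] - 2 * c
--         if best_val is None or v > best_val:
--             best_val = v
--             best_word = w
--     return best_word
-- ===== Notes on version B (the rewrite author's own statement) =====
-- stated objective: faster
-- what changed: Replaces A's nested all-pairs scan (every word x every position x every other word, with a substring test inside) by letter-presence counts, (position, letter) counts and duplicate counts precomputed once, scoring each word by table lookups and keeping the first maximum in a single pass.
import Mathlib
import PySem

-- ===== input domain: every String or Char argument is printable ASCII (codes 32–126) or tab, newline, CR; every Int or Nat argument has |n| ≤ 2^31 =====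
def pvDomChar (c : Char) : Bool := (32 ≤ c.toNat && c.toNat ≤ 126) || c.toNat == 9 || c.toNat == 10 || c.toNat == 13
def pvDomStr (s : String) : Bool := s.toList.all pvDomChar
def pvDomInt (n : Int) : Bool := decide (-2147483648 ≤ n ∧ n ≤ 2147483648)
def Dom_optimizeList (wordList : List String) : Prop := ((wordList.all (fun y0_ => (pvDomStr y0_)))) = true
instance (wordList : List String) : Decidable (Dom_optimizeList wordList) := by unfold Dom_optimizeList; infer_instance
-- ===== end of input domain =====

-- B replaces A's nested scan (each word × each position × each other word, substring test inside)
-- by letter-presence and (position, letter) count tables built once, scoring each word by table lookups.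

-- ===== PORT A =====
-- per-word score: the two inner loops of A (over positions of `word`, then over indices of `wordList`).
-- `letter in compareWord` with `letter` a 1-character string is exactly membership of that character.
def aScore (wordList : List String) (word : String) : Int :=
  (PySem.List.pyRange 0 (PySem.Str.len word) 1).foldl (fun value x =>
    let letter := PySem.List.pyGetD word.toList x ' '   -- word[x], x ∈ range(len(word)): always in range
    (PySem.List.pyRange 0 (PySem.List.len wordList) 1).foldl (fun value i =>
      let compareWord := PySem.List.pyGetD wordList i ""  -- wordList[i], i in range: always in range
      if compareWord == word then value
      else if compareWord.toList.contains letter &&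
              (PySem.Str.pyGet? compareWord x == some letter) then value + 2
      else if compareWord.toList.contains letter then value + 1
      else value) value) 0

def optimizeList (wordList : List String) : String :=
  if wordList == [] then "No word found"
  else
    let valueList := wordList.foldl (fun vl word => vl ++ [aScore wordList word]) []
    let max_value := (PySem.List.max? valueList (fun v => v)).getD 0            -- max() on a nonempty list
    let max_index := (PySem.List.index? valueList max_value).getD 0            -- .index of a present value
    (PySem.List.pyGet? wordList (max_index : Int)).getD "No word found"        -- in range by construction

-- ===== PORT B =====
-- distinct letters of all words, in first-appearance order
def bLetters (wordList : List String) : List Char :=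
  wordList.foldl (fun acc w =>
    w.toList.foldl (fun acc ch => if acc.contains ch then acc else acc ++ [ch]) acc) []

-- presence = {l: sum(1 for w in wordList if l in w) for l in letters}
def bPresence (wordList : List String) : PySem.Dict Char Int :=
  PySem.Dict.ofList ((bLetters wordList).map
    (fun l => (l, (wordList.countP (fun w => w.toList.contains l) : Int))))

def bMaxlen (wordList : List String) : Nat :=
  ((PySem.List.max? (wordList.map (fun w => w.toList.length)) (fun n => n)).getD 0)

-- pos = {(x, l): sum(1 for w in wordList if x < len(w) and w[x] == l) for x in range(maxlen) for l in letters}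
def bPos (wordList : List String) : PySem.Dict (Nat × Char) Int :=
  PySem.Dict.ofList ((List.range (bMaxlen wordList)).flatMap (fun x =>
    (bLetters wordList).map (fun l =>
      ((x, l), (wordList.countP (fun w => w.toList[x]? == some l) : Int)))))

-- score of one word via the two tables
def bScore (wordList : List String) (w : String) : Int :=
  (List.range w.toList.length).foldl (fun v x =>
    let l := w.toList.getD x ' '
    v + (bPresence wordList).getD l 0 + (bPos wordList).getD (x, l) 0
      - 2 * (wordList.count w : Int)) 0

def optimizeList_alt (wordList : List String) : String :=
  if wordList == [] then "No word found"
  else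
    ((wordList.foldl (fun (st : Option String × Option Int) w =>
        let v := bScore wordList w
        match st.2 with
        | none => (some w, some v)
        | some bv => if v > bv then (some w, some v) else st)
      (none, none)).1).getD "No word found"   -- best_word; some _ since the list is nonempty

-- ===== PRECONDITION & SPEC =====
-- Pre_ excludes exactly the inputs on which A raises IndexError: a word w whose letter at some
-- position x also occurs in a different word v with len(v) ≤ x makes A evaluate v[x];
-- there B would return the best-scoring word, counting only words long enough at each position.
def Pre_optimizeList (wordList : List String) : Prop :=
  (wordList.all (fun w => wordList.all (fun v =>
    v == w || (w.toList.drop v.toList.length).all (fun c => !(v.toList.contains c))))) = true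
instance (wordList : List String) : Decidable (Pre_optimizeList wordList) := by
  unfold Pre_optimizeList; infer_instance

def pvWitness_optimizeList : List String := ["ab", "ba", "aa"]

def Spec_optimizeList (wordList : List String) (out : String) : Prop := out = optimizeList_alt wordList
instance (wordList : List String) (out : String) : Decidable (Spec_optimizeList wordList out) := by
  unfold Spec_optimizeList; infer_instance

-- ===== CLAIM (what is proved, stated in full; the proofs are below) =====
def Claim_equal_optimizeList : Prop := ∀ (wordList : List String), Dom_optimizeList wordList → Pre_optimizeList wordList → Spec_optimizeList wordList (optimizeList wordList)

-- ===== LEMMAS AND PROOFS =====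

-- the propositional reading of the Boolean precondition
theorem Pre_iff (ws : List String) :
    Pre_optimizeList ws ↔ ∀ w ∈ ws, ∀ v ∈ ws, v ≠ w →
      ∀ c ∈ w.toList.drop v.toList.length, c ∉ v.toList := by
  unfold Pre_optimizeList
  rw [List.all_eq_true]
  constructor
  · intro h w hw v hv hne c hc
    have h1 := h w hw
    rw [List.all_eq_true] at h1
    have h2 := h1 v hv
    rcases (Bool.or_eq_true _ _).mp h2 with h3 | h3
    · exact absurd (by simpa using h3) hne
    · rw [List.all_eq_true] at h3
      simpa using h3 c hc
  · intro h w hw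
    rw [List.all_eq_true]
    intro v hv
    rw [Bool.or_eq_true _ _]
    by_cases hvw : v = w
    · exact Or.inl (by simpa using hvw)
    · refine Or.inr ?_
      rw [List.all_eq_true]
      intro c hc
      simpa using h w hw v hv hvw c hc

-- ---- the letter list ----
theorem bLetters_eq (ws : List String) :
    bLetters ws = ws.foldl (fun acc w => PySem.Set.update acc w.toList) [] := rfl

theorem mem_foldl_update (ws : List String) (acc : List Char) (c : Char) :
    c ∈ ws.foldl (fun acc w => PySem.Set.update acc w.toList) acc ↔
      c ∈ acc ∨ ∃ w ∈ ws, c ∈ w.toList := by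
  induction ws generalizing acc with
  | nil => simp
  | cons w t ih => simp [ih, PySem.Set.mem_update]; tauto

theorem nodup_bLetters (ws : List String) : (bLetters ws).Nodup := by
  rw [bLetters_eq]
  generalize hacc : ([] : List Char) = acc
  have h : acc.Nodup := by rw [← hacc]; exact List.nodup_nil
  clear hacc
  induction ws generalizing acc with
  | nil => simpa
  | cons w t ih => exact ih _ (PySem.Set.nodup_update _ _ h)

theorem mem_bLetters {ws : List String} {w : String} (hw : w ∈ ws) {c : Char} (hc : c ∈ w.toList) :
    c ∈ bLetters ws := by
  rw [bLetters_eq, mem_foldl_update]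
  exact Or.inr ⟨w, hw, hc⟩

-- ---- table lookups ----
theorem ofList_getD {κ ν : Type} [BEq κ] [LawfulBEq κ] (prs : List (κ × ν)) (h : (prs.map Prod.fst).Nodup)
    {k : κ} {v : ν} (hm : (k, v) ∈ prs) (d0 : ν) : (PySem.Dict.ofList prs).getD k d0 = v := by
  have hit : (PySem.Dict.ofList prs).items = prs := by
    have := PySem.Dict.items_foldl_insert_fresh prs Prod.fst Prod.snd PySem.Dict.empty (by simp) h
    simpa [PySem.Dict.ofList, PySem.Dict.update] using this
  exact PySem.Dict.getD_of_mem_items _ (by rw [hit]; exact hm)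
    (by rw [show (PySem.Dict.ofList prs).keys = prs.map Prod.fst from by
          simp [PySem.Dict.keys, hit]]; exact h) d0

theorem bPresence_getD {ws : List String} {l : Char} (hl : l ∈ bLetters ws) :
    (bPresence ws).getD l 0 = (ws.countP (fun w => w.toList.contains l) : Int) := by
  apply ofList_getD
  · have h2 : (((bLetters ws).map
        (fun l => (l, (ws.countP (fun w => w.toList.contains l) : Int)))).map Prod.fst)
        = bLetters ws := by
      rw [List.map_map]; exact List.map_id _
    rw [h2]; exact nodup_bLetters ws
  · exact List.mem_map_of_mem hl

theorem len_le_bMaxlen {ws : List String} {w : String} (hw : w ∈ ws) :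
    w.toList.length ≤ bMaxlen ws := by
  have hmem : w.toList.length ∈ ws.map (fun w => w.toList.length) := List.mem_map_of_mem hw
  obtain ⟨m, hm⟩ : ∃ m, PySem.List.max? (ws.map (fun w => w.toList.length)) (fun n => n) = some m := by
    cases h : PySem.List.max? (ws.map (fun w => w.toList.length)) (fun n => n) with
    | none => rw [PySem.List.max?_eq_none_iff] at h; rw [h] at hmem; simp at hmem
    | some m => exact ⟨m, rfl⟩
  have := PySem.List.max?_isMax hm _ hmem
  unfold bMaxlen
  rw [hm]
  simpa using this

theorem bPos_getD {ws : List String} {x : Nat} {l : Char}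
    (hx : x < bMaxlen ws) (hl : l ∈ bLetters ws) :
    (bPos ws).getD (x, l) 0 = (ws.countP (fun w => w.toList[x]? == some l) : Int) := by
  apply ofList_getD
  · have : ((List.range (bMaxlen ws)).flatMap (fun x =>
        (bLetters ws).map (fun l =>
          ((x, l), (ws.countP (fun w => w.toList[x]? == some l) : Int))))).map Prod.fst
        = (List.range (bMaxlen ws)) ×ˢ (bLetters ws) := by
      simp only [List.map_flatMap, List.map_map, SProd.sprod, List.product]
      rfl
    rw [this]
    exact List.Nodup.product (List.nodup_range) (nodup_bLetters ws)
  · exact List.mem_flatMap.mpr ⟨x, List.mem_range.mpr hx, List.mem_map_of_mem hl⟩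

-- ---- the per-word scores agree ----
theorem sum_map_sub {α : Type} (l : List α) (f g h : α → Int) :
    (l.map (fun a => f a + g a - 2 * h a)).sum = (l.map f).sum + (l.map g).sum - 2 * (l.map h).sum := by
  induction l with
  | nil => simp
  | cons a t ih => simp only [List.map_cons, List.sum_cons, ih]; ring

-- per-(word,position) contribution expressed through the three global counts
def posCount (ws : List String) (w : String) (letter : Char) (x : Nat) : Int :=
  (ws.countP (fun v => v.toList.contains letter) : Int)
  + (ws.countP (fun v => v.toList[x]? == some letter) : Int)
  - 2 * (ws.count w : Int)

-- inner loop of A = posCount, for a letter actually at position x of w ∈ ws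
theorem inner_eq {ws : List String}
    (hpre : ∀ w ∈ ws, ∀ v ∈ ws, v ≠ w → ∀ c ∈ w.toList.drop v.toList.length, c ∉ v.toList) {w : String} (hw : w ∈ ws)
    {x : Nat} (hx : x < w.toList.length) (value : Int) :
    (PySem.List.pyRange 0 (PySem.List.len ws) 1).foldl (fun value i =>
      let compareWord := PySem.List.pyGetD ws i ""
      if compareWord == w then value
      else if compareWord.toList.contains (w.toList[x]) &&
              (PySem.Str.pyGet? compareWord (x : Int) == some (w.toList[x])) then value + 2
      else if compareWord.toList.contains (w.toList[x]) then value + 1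
      else value) value
    = value + posCount ws w (w.toList[x]) x := by
  set letter := w.toList[x] with hletter
  rw [PySem.List.foldl_pyRange_pyGetD ws "" (fun value compareWord =>
      if compareWord == w then value
      else if compareWord.toList.contains letter &&
              (PySem.Str.pyGet? compareWord (x : Int) == some letter) then value + 2
      else if compareWord.toList.contains letter then value + 1
      else value) value (le_refl 0)]
  rw [show Int.toNat 0 = 0 from rfl, List.drop_zero]
  rw [PySem.List.foldl_congr_mem _ _ (fun value cw => value +
      ((if cw.toList.contains letter then 1 else 0)
       + (if cw.toList[x]? == some letter then 1 else 0)
       - 2 * (if cw == w then 1 else 0))) _ ?_]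
  · rw [PySem.List.foldl_add]
    unfold posCount
    rw [sum_map_sub ws (fun cw => if cw.toList.contains letter then (1:Int) else 0)
      (fun cw => if cw.toList[x]? == some letter then (1:Int) else 0)
      (fun cw => if cw == w then (1:Int) else 0)]
    rw [PySem.List.sum_map_ite_one_zero, PySem.List.sum_map_ite_one_zero,
      PySem.List.sum_map_ite_one_zero (fun cw => cw == w) ws, List.count_eq_countP]
  · -- pointwise equality on members
    intro value cw hcw
    by_cases hccw : cw = w
    · subst hccw
      simp [List.getElem?_eq_getElem hx, hletter]
    · have hne : (cw == w) = false := by simp [hccw]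
      by_cases hc : letter ∈ cw.toList
      · -- Pre_ gives x < cw.length: A never evaluates an out-of-range cw[x] here
        have hxlt : x < cw.toList.length := by
          by_contra hge
          push_neg at hge
          have : letter ∈ w.toList.drop cw.toList.length := by
            rw [hletter]
            have : w.toList[x] = (w.toList.drop cw.toList.length)[x - cw.toList.length]'(by
              rw [List.length_drop]; omega) := by
              rw [List.getElem_drop]
              congr 1
              omega
            rw [this]
            exact List.getElem_mem _
          exact hpre w hw cw hcw hccw letter this hc
        have hget : PySem.Str.pyGet? cw (x : Int) = cw.toList[x]? := by
          simp [PySem.Str.pyGet?_eq]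
        by_cases heq : cw.toList[x] = letter
        · simp [hc, hne, hget, List.getElem?_eq_getElem hxlt, heq]
        · simp [hc, hne, hget, List.getElem?_eq_getElem hxlt, heq]
      · have h2 : (cw.toList[x]? == some letter) = false := by
          rw [beq_eq_false_iff_ne]
          intro hcl
          exact hc (List.mem_of_getElem? hcl)
        have h3 : PySem.Str.pyGet? cw (x : Int) = cw.toList[x]? := by
          simp [PySem.Str.pyGet?_eq]
        simp [hc, h2, h3, hne]

theorem aScore_eq_fold {ws : List String}
    (hpre : ∀ w ∈ ws, ∀ v ∈ ws, v ≠ w → ∀ c ∈ w.toList.drop v.toList.length, c ∉ v.toList) {w : String} (hw : w ∈ ws) :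
    aScore ws w = (List.range w.toList.length).foldl
      (fun v k => v + posCount ws w (w.toList.getD k ' ') k) 0 := by
  unfold aScore
  rw [PySem.List.pyRange_one 0 (PySem.Str.len w), List.foldl_map]
  have hn : ((PySem.Str.len w : Int) - 0).toNat = w.toList.length := by
    simp [PySem.Str.len_eq]
  rw [hn]
  apply PySem.List.foldl_congr_mem
  intro acc k hk
  have hk' : k < w.toList.length := List.mem_range.mp hk
  simp only [zero_add]
  have hlet : PySem.List.pyGetD w.toList (k : Int) ' ' = w.toList[k] := by
    simp [List.getD_eq_getElem _ _ hk', List.getElem?_eq_getElem hk']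
  rw [hlet]
  rw [inner_eq hpre hw hk' acc]
  rw [List.getD_eq_getElem _ _ hk']

theorem bScore_eq_fold {ws : List String} {w : String} (hw : w ∈ ws) :
    bScore ws w = (List.range w.toList.length).foldl
      (fun v k => v + posCount ws w (w.toList.getD k ' ') k) 0 := by
  unfold bScore
  apply PySem.List.foldl_congr_mem
  intro acc k hk
  have hk' : k < w.toList.length := List.mem_range.mp hk
  have hlmem : w.toList.getD k ' ' ∈ bLetters ws := by
    rw [List.getD_eq_getElem _ _ hk']
    exact mem_bLetters hw (List.getElem_mem hk')
  simp only [bPresence_getD hlmem, bPos_getD (lt_of_lt_of_le hk' (len_le_bMaxlen hw)) hlmem,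
    posCount]
  ring

theorem score_eq {ws : List String}
    (hpre : ∀ w ∈ ws, ∀ v ∈ ws, v ≠ w → ∀ c ∈ w.toList.drop v.toList.length, c ∉ v.toList) {w : String} (hw : w ∈ ws) :
    aScore ws w = bScore ws w := by
  rw [aScore_eq_fold hpre hw, bScore_eq_fold hw]

-- ---- selection: first word attaining the maximal score ----
def argmaxFirst (s : String → Int) : String → Int → List String → String
  | bw, _, [] => bw
  | bw, bv, w :: t => if s w > bv then argmaxFirst s w (s w) t else argmaxFirst s bw bv t

theorem altFold_eq_argmaxFirst (s : String → Int) (t : List String) (bw : String) (bv : Int) :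
    ((t.foldl (fun (st : Option String × Option Int) w =>
        let v := s w
        match st.2 with
        | none => (some w, some v)
        | some bv => if v > bv then (some w, some v) else st)
      (some bw, some bv)).1).getD "No word found" = argmaxFirst s bw bv t := by
  induction t generalizing bw bv with
  | nil => simp [argmaxFirst]
  | cons w t ih =>
    simp only [List.foldl_cons, argmaxFirst]
    by_cases h : s w > bv
    · simp only [h, if_pos]
      exact ih w (s w)
    · simp only [h, if_neg, if_false]
      exact ih bw bv

theorem argmaxFirst_congr (s s' : String → Int) (t : List String) (bw : String)
    (h : ∀ y ∈ bw :: t, s y = s' y) :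
    argmaxFirst s bw (s bw) t = argmaxFirst s' bw (s' bw) t := by
  induction t generalizing bw with
  | nil => simp [argmaxFirst]
  | cons w t ih =>
    have hbw : s bw = s' bw := h bw (List.mem_cons_self)
    have hw : s w = s' w := h w (List.mem_cons_of_mem _ List.mem_cons_self)
    simp only [argmaxFirst]
    by_cases hgt : s' w > s' bw
    · rw [if_pos (show s w > s bw by omega), if_pos hgt]
      exact ih w (fun y hy => by
        rcases List.mem_cons.mp hy with h1 | h1
        · subst h1; exact hw
        · exact h y (List.mem_cons_of_mem _ (List.mem_cons_of_mem _ h1)))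
    · rw [if_neg (show ¬ s w > s bw by omega), if_neg hgt]
      exact ih bw (fun y hy => by
        rcases List.mem_cons.mp hy with h1 | h1
        · subst h1; exact hbw
        · exact h y (List.mem_cons_of_mem _ (List.mem_cons_of_mem _ h1)))

theorem argmaxFirst_eq_find (s : String → Int) (t : List String) (bw : String) :
    some (argmaxFirst s bw (s bw) t) = (bw :: t).find? (fun w => s w == (t.map s).foldl max (s bw)) := by
  induction t generalizing bw with
  | nil => simp [argmaxFirst]
  | cons w t ih =>
    simp only [argmaxFirst, List.map_cons, List.foldl_cons]
    by_cases hgt : s w > s bw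
    · have hmax : max (s bw) (s w) = s w := by omega
      rw [hmax]
      have hbwne : (s bw == (t.map s).foldl max (s w)) = false := by
        have := (PySem.List.le_foldl_max (t.map s) (s w)).1
        rw [beq_eq_false_iff_ne]
        omega
      rw [if_pos hgt, List.find?_cons_of_neg (by simpa using (beq_eq_false_iff_ne.mp hbwne))]
      exact ih w
    · have hmax : max (s bw) (s w) = s bw := by omega
      rw [hmax, if_neg hgt]
      rw [ih bw]
      by_cases hbw : s bw = (t.map s).foldl max (s bw)
      · rw [List.find?_cons_of_pos (by simpa using hbw),
          List.find?_cons_of_pos (by simpa using hbw)]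
      · have hwne : s w ≠ (t.map s).foldl max (s bw) := by
          have := (PySem.List.le_foldl_max (t.map s) (s bw)).1
          omega
        rw [List.find?_cons_of_neg (by simpa using hbw),
          List.find?_cons_of_neg (by simpa using hbw),
          List.find?_cons_of_neg (by simpa using hwne)]

theorem find_index_max (s : String → Int) (ws : List String) (M : Int)
    (h : ∃ w ∈ ws, s w = M) :
    ws[((PySem.List.index? (ws.map s) M).getD 0)]? = ws.find? (fun w => s w == M) := by
  induction ws with
  | nil => simp at h
  | cons a t ih =>
    by_cases ha : s a = M
    · rw [List.map_cons, ha, PySem.List.index?_cons_self,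
        List.find?_cons_of_pos (by simpa using ha)]
      simp
    · have hm : ∃ w ∈ t, s w = M := by
        rcases h with ⟨w, hw, hsw⟩
        rcases List.mem_cons.mp hw with h1 | h1
        · exact absurd (h1 ▸ hsw) ha
        · exact ⟨w, h1, hsw⟩
      rw [List.map_cons, PySem.List.index?_cons_of_ne (t.map s) (by simpa using ha)]
      obtain ⟨i, hi⟩ : ∃ i, PySem.List.index? (t.map s) M = some i := by
        cases hq : PySem.List.index? (t.map s) M with
        | none =>
          rw [PySem.List.index?_eq_none_iff] at hq
          rcases hm with ⟨w, hw, hsw⟩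
          exact absurd (hsw ▸ List.mem_map_of_mem hw) hq
        | some i => exact ⟨i, rfl⟩
      rw [hi]
      simp only [Option.map_some, Option.getD_some]
      rw [List.find?_cons_of_neg (by simpa using ha)]
      rw [← ih hm, hi]
      simp

-- ===== VERDICT (by name: the statement is the Claim_ definition above) =====
theorem optimizeList_spec : Claim_equal_optimizeList := by
  intro ws _ hpre0
  have hpre := (Pre_iff ws).mp hpre0
  unfold Spec_optimizeList
  cases ws with
  | nil => rfl
  | cons w0 t =>
    unfold optimizeList optimizeList_alt
    have hne : ((w0 :: t) == ([] : List String)) = false := by simp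
    rw [hne]
    simp only [Bool.false_eq_true, if_false, List.foldl_cons]
    -- B side: the fold after seeding the first word, then scores replaced by A's
    have hB : ((t.foldl (fun (st : Option String × Option Int) w =>
        let v := bScore (w0 :: t) w
        match st.2 with
        | none => (some w, some v)
        | some bv => if v > bv then (some w, some v) else st)
      (some w0, some (bScore (w0 :: t) w0))).1).getD "No word found"
        = argmaxFirst (aScore (w0 :: t)) w0 (aScore (w0 :: t) w0) t := by
      rw [altFold_eq_argmaxFirst (bScore (w0 :: t)) t w0 (bScore (w0 :: t) w0)]
      exact (argmaxFirst_congr (aScore (w0 :: t)) (bScore (w0 :: t)) t w0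
        (fun y hy => score_eq hpre hy)).symm
    -- A side
    rw [PySem.List.foldl_append_singleton_eq_map, List.nil_append, List.singleton_append,
      PySem.List.max?_id_cons, Option.getD_some, PySem.List.pyGet?_natCast,
      ← List.map_cons]
    rw [find_index_max (aScore (w0 :: t)) (w0 :: t) _ ?_]
    · rw [← argmaxFirst_eq_find (aScore (w0 :: t)) t w0]
      simp only [Option.getD_some]
      exact hB.symm
    · rcases PySem.List.foldl_max_mem (t.map (aScore (w0 :: t))) (aScore (w0 :: t) w0) with h | h
      · exact ⟨w0, List.mem_cons_self, h.symm⟩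
      · rcases List.mem_map.mp h with ⟨w, hw, hsw⟩
        exact ⟨w, List.mem_cons_of_mem _ hw, hsw⟩
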